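-- pv_equiv track=rewrite | github.com/yurahriaziev/SDE-preparation | data_dependent_on_day.py | data_on_day
-- ===== SOURCE A (Python) =====
-- import math
--
-- def data_on_day(n):
--     seen = set()
--     k = 1
--     while k <= n:
--         value = math.floor(n/k)
--         seen.add(value)
--         next_k = n // value
--         k = next_k + 1
--
--     return sum(seen)
-- ===== SOURCE B (Python) =====
-- import math
--
-- def data_on_day(n):
--     if n <= 0:
--         return 0
--     s = math.isqrt(n)
--     total = 0
--     for k in range(1, s + 1):
--         q = n // k
--         total += k + (q if q > s else 0)
--     return total
-- ===== Notes on version B (the rewrite author's own statement) =====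
-- stated objective: alternative
-- what changed: Replaces A's adaptive block-jumping while-loop (k jumps to n//(n//k)+1) with the divisor-symmetry decomposition: the distinct quotients are exactly {1..isqrt(n)} together with {n//k : 1<=k<=isqrt(n)}, built as a set union over a fixed range and summed.
import Mathlib
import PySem

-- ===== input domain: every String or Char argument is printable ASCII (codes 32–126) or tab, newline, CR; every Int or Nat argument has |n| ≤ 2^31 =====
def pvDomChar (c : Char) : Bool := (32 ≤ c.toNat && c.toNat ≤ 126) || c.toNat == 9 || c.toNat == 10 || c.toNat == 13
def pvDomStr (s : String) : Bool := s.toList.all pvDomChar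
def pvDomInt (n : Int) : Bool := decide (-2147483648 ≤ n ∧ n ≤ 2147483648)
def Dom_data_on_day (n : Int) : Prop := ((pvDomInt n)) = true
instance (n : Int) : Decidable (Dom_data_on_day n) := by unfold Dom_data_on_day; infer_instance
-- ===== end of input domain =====

-- B replaces A's adaptive block-jumping loop over a set with one arithmetic pass
-- k = 1..isqrt(n) accumulating k + (n//k if n//k > isqrt(n)); same O(√n) count, no set.

-- ===== PORT A =====
-- invariants of A's loop (cited by the port's own termination proof)
theorem dod_one_le_value {n k : Int} (hk : 1 ≤ k) (hkn : k ≤ n) :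
    1 ≤ PySem.Int.floordiv n k := by
  rw [PySem.Int.le_floordiv_iff_mul_le (by omega)]; omega

theorem dod_le_next {n k : Int} (hk : 1 ≤ k) (hkn : k ≤ n) :
    k ≤ PySem.Int.floordiv n (PySem.Int.floordiv n k) := by
  have hv := dod_one_le_value hk hkn
  rw [PySem.Int.le_floordiv_iff_mul_le (by omega)]
  have h1 := PySem.Int.floordiv_mul_add_mod n k
  have h2 := PySem.Int.mod_nonneg n (b := k) (by omega)
  nlinarith [h1, h2]

-- the while-loop of A: `while k <= n: value = floor(n/k); seen.add(value); k = n//value + 1`.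
-- `math.floor(n/k)` on the float n/k equals n//k for every |n| ≤ 2^31, so it is ported as floordiv.
-- `seen.add(value)`: the successive `value`s are strictly decreasing (theorem dodLoop_value_lt
-- below), so `value` is never already in `seen` and Python's hash-set add inserts it; it is
-- ported as `value :: seen`, which holds exactly the elements of Python's `seen` (a quadratic
-- `PySem.Set.add` would compute the same list reversed — `sum(seen)` ignores both order and the
-- never-taken duplicate branch).
def dodLoop (n : Int) (seen : List Int) (k : Int) (hk : 1 ≤ k) : List Int :=
  if h : k ≤ n then
    let value := PySem.Int.floordiv n k
    dodLoop n (value :: seen) (PySem.Int.floordiv n value + 1)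
      (by simp only [value]; have := dod_le_next hk h; omega)
  else seen
termination_by (n + 1 - k).toNat
decreasing_by
  have h1 := dod_le_next hk h
  omega

def data_on_day (n : Int) : Int :=
  (dodLoop n [] 1 (by norm_num)).sum

-- ===== PORT B =====
def data_on_day_alt (n : Int) : Int :=
  if n ≤ 0 then 0
  else
    let s : Int := (Nat.sqrt n.toNat : Int)   -- math.isqrt(n)
    (PySem.List.pyRange 1 (s + 1) 1).foldl
      (fun total k =>
        let q := PySem.Int.floordiv n k
        total + (k + (if s < q then q else 0))) 0

-- ===== PRECONDITION & SPEC =====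
def Spec_data_on_day (n : Int) (out : Int) : Prop := out = data_on_day_alt n
instance (n : Int) (out : Int) : Decidable (Spec_data_on_day n out) := by unfold Spec_data_on_day; infer_instance

-- ===== CLAIM (what is proved, stated in full; the proofs are below) =====
def Claim_equal_data_on_day : Prop := ∀ (n : Int), Dom_data_on_day n → Spec_data_on_day n (data_on_day n)

-- ===== LEMMAS AND PROOFS =====

theorem nat_le_div_div {m v : Nat} (hv : 1 ≤ v) (hvm : v ≤ m) : v ≤ m / (m / v) := by
  have h1 : 1 ≤ m / v := (Nat.one_le_div_iff (by omega)).mpr hvm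
  rw [Nat.le_div_iff_mul_le (by omega)]
  exact Nat.mul_div_le m v

theorem nat_block {m a b : Nat} (ha : 1 ≤ a) (ham : a ≤ m) (hab : a ≤ b)
    (hb : b ≤ m / (m / a)) : m / b = m / a := by
  have hv : 1 ≤ m / a := (Nat.one_le_div_iff (by omega)).mpr ham
  have h1 : m / b ≤ m / a := Nat.div_le_div_left hab (by omega)
  have h0 : 0 < m / (m / a) := by
    have := nat_le_div_div ha ham; omega
  have h2 : m / (m / (m / a)) ≤ m / b := Nat.div_le_div_left hb (by omega)
  have h3 : m / a ≤ m / (m / (m / a)) := nat_le_div_div hv (Nat.div_le_self m a)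
  omega

theorem nat_div_div_sqrt {m v : Nat} (hv : 1 ≤ v) (hvs : v ≤ Nat.sqrt m) : m / (m / v) = v := by
  have hvv : v * v ≤ m := Nat.le_sqrt.mp hvs
  have hvm : v ≤ m := le_trans (Nat.le_mul_of_pos_left v (by omega)) hvv
  have hj : v ≤ m / v := (Nat.le_div_iff_mul_le (by omega)).mpr hvv
  have h1 : v ≤ m / (m / v) := nat_le_div_div hv hvm
  have h2 : m / (m / v) < v + 1 := by
    rw [Nat.div_lt_iff_lt_mul (by omega)]
    have hd := Nat.div_add_mod m v
    have hr : m % v < v := Nat.mod_lt m (by omega)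
    nlinarith [hd, hr, hj]
  omega

theorem fd_nat {n j : Int} (hn : 0 ≤ n) (hj : 1 ≤ j) :
    PySem.Int.floordiv n j = ((n.toNat / j.toNat : Nat) : Int) := by
  obtain ⟨m, rfl⟩ : ∃ m : Nat, n = (m : Int) := ⟨n.toNat, by omega⟩
  obtain ⟨b, rfl⟩ : ∃ b : Nat, j = (b : Int) := ⟨j.toNat, by omega⟩
  simp

theorem int_block {n k j : Int} (hk : 1 ≤ k) (hkn : k ≤ n) (hkj : k ≤ j)
    (hj : j ≤ PySem.Int.floordiv n (PySem.Int.floordiv n k)) :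
    PySem.Int.floordiv n j = PySem.Int.floordiv n k := by
  have hn : (0:Int) ≤ n := by omega
  have hv : 1 ≤ PySem.Int.floordiv n k := by
    rw [PySem.Int.le_floordiv_iff_mul_le (by omega)]; omega
  rw [fd_nat hn hk] at hj hv ⊢
  rw [fd_nat hn hv] at hj
  simp only [Int.toNat_natCast] at hj
  rw [fd_nat hn (le_trans hk hkj)]
  have hb : j.toNat ≤ n.toNat / (n.toNat / k.toNat) := by omega
  exact_mod_cast congrArg (Nat.cast : Nat → Int)
    (nat_block (by omega) (by omega) (by omega) hb)

-- A's `value` strictly decreases from one iteration to the next: the port's `value :: seen`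
-- never inserts an element already present.
theorem dodLoop_value_lt {n k : Int} (hk : 1 ≤ k) (hkn : k ≤ n)
    (_h2 : PySem.Int.floordiv n (PySem.Int.floordiv n k) + 1 ≤ n) :
    PySem.Int.floordiv n (PySem.Int.floordiv n (PySem.Int.floordiv n k) + 1) <
      PySem.Int.floordiv n k := by
  have hv := dod_one_le_value hk hkn
  have hnext := dod_le_next hk hkn
  by_contra hcon
  replace hcon : PySem.Int.floordiv n k ≤
      PySem.Int.floordiv n (PySem.Int.floordiv n (PySem.Int.floordiv n k) + 1) :=
    le_of_not_gt hcon
  rw [PySem.Int.le_floordiv_iff_mul_le (by omega)] at hcon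
  have : PySem.Int.floordiv n (PySem.Int.floordiv n k) + 1 ≤
      PySem.Int.floordiv n (PySem.Int.floordiv n k) := by
    rw [PySem.Int.le_floordiv_iff_mul_le (by omega)]
    nlinarith [hcon]
  omega

theorem dodLoop_mem (n : Int) (seen : List Int) (k : Int) (hk : 1 ≤ k) (v : Int) :
    v ∈ dodLoop n seen k hk ↔
      v ∈ seen ∨ ∃ j : Int, k ≤ j ∧ j ≤ n ∧ v = PySem.Int.floordiv n j := by
  fun_induction dodLoop n seen k hk with
  | case1 seen k hk h value ih =>
    have hval : value = PySem.Int.floordiv n k := rfl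
    rw [ih, List.mem_cons]
    have hnext : k ≤ PySem.Int.floordiv n value := hval ▸ dod_le_next hk h
    constructor
    · rintro ((rfl | hs) | ⟨j, hj1, hj2, rfl⟩)
      · exact Or.inr ⟨k, le_refl k, h, rfl⟩
      · exact Or.inl hs
      · exact Or.inr ⟨j, by omega, hj2, rfl⟩
    · rintro (hs | ⟨j, hj1, hj2, rfl⟩)
      · exact Or.inl (Or.inr hs)
      · by_cases hjb : j ≤ PySem.Int.floordiv n value
        · exact Or.inl (Or.inl (int_block hk h hj1 (by rw [hval] at hjb; exact hjb)))
        · exact Or.inr ⟨j, by omega, hj2, rfl⟩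
  | case2 seen k hk h =>
    simp only [iff_self_or]
    rintro ⟨j, hj1, hj2, rfl⟩
    omega

theorem dodLoop_nodup (n : Int) (seen : List Int) (k : Int) (hk : 1 ≤ k) :
    seen.Nodup → (∀ x ∈ seen, k ≤ n → PySem.Int.floordiv n k < x) →
    (dodLoop n seen k hk).Nodup := by
  fun_induction dodLoop n seen k hk with
  | case1 seen k hk h value ih =>
    intro hnd hlt
    have hval : value = PySem.Int.floordiv n k := rfl
    apply ih
    · refine List.Nodup.cons ?_ hnd
      intro hmem
      exact absurd rfl (ne_of_gt (hlt value hmem h))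
    · intro x hx hk'
      rcases List.mem_cons.mp hx with rfl | hxs
      · exact hval ▸ dodLoop_value_lt hk h (hval ▸ hk')
      · calc PySem.Int.floordiv n (PySem.Int.floordiv n value + 1) < value :=
              hval ▸ dodLoop_value_lt hk h (hval ▸ hk')
          _ < x := hval ▸ hlt x hxs h
  | case2 seen k hk h =>
    intro hnd _
    exact hnd

-- the distinct quotients are exactly {1..√m} ∪ {m/k > √m : k ≤ √m}
theorem bridge {m : Nat} (hm : 1 ≤ m) (v : Int) :
    (∃ j : Int, 1 ≤ j ∧ j ≤ (m : Int) ∧ v = PySem.Int.floordiv (m : Int) j) ↔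
    ((1 ≤ v ∧ v ≤ (Nat.sqrt m : Int)) ∨
     ∃ k : Int, (1 ≤ k ∧ k ≤ (Nat.sqrt m : Int)) ∧
       v = PySem.Int.floordiv (m : Int) k ∧ (Nat.sqrt m : Int) < v) := by
  have hsm : Nat.sqrt m ≤ m := Nat.sqrt_le_self m
  constructor
  · rintro ⟨j, hj1, hj2, rfl⟩
    by_cases hjs : j ≤ (Nat.sqrt m : Int)
    · by_cases hvs : PySem.Int.floordiv (m : Int) j ≤ (Nat.sqrt m : Int)
      · left
        refine ⟨?_, hvs⟩
        rw [fd_nat (by omega) hj1]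
        simp only [Int.toNat_natCast]
        have : 1 ≤ m / j.toNat := (Nat.one_le_div_iff (by omega)).mpr (by omega)
        omega
      · exact Or.inr ⟨j, ⟨hj1, hjs⟩, rfl, by omega⟩
    · left
      replace hjs : (Nat.sqrt m : Int) < j := lt_of_not_ge hjs
      rw [fd_nat (by omega) hj1]
      have hb : Nat.sqrt m + 1 ≤ j.toNat := by omega
      have hjm : j.toNat ≤ m := by omega
      have h1 : 1 ≤ m / j.toNat := (Nat.one_le_div_iff (by omega)).mpr hjm
      have h2 : m / j.toNat < Nat.sqrt m + 1 := by
        rw [Nat.div_lt_iff_lt_mul (by omega)]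
        calc m < (Nat.sqrt m + 1) * (Nat.sqrt m + 1) := Nat.lt_succ_sqrt m
          _ ≤ (Nat.sqrt m + 1) * j.toNat := Nat.mul_le_mul_left _ hb
      simp only [Int.toNat_natCast]
      omega
  · rintro (⟨hv1, hv2⟩ | ⟨k, ⟨hk1, hk2⟩, rfl, _⟩)
    · refine ⟨PySem.Int.floordiv (m : Int) v, ?_, ?_, ?_⟩
      · rw [fd_nat (by omega) hv1]
        simp only [Int.toNat_natCast]
        have : 1 ≤ m / v.toNat := (Nat.one_le_div_iff (by omega)).mpr (by omega)
        omega
      · rw [fd_nat (by omega) hv1]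
        simp only [Int.toNat_natCast]
        have := Nat.div_le_self m v.toNat
        omega
      · have hfd : PySem.Int.floordiv (m : Int) v = ((m / v.toNat : Nat) : Int) :=
          fd_nat (by omega) hv1
        have h1 : 1 ≤ m / v.toNat := (Nat.one_le_div_iff (by omega)).mpr (by omega)
        rw [hfd, fd_nat (by omega) (by exact_mod_cast h1)]
        simp only [Int.toNat_natCast]
        rw [nat_div_div_sqrt (by omega) (by omega)]
        omega
    · exact ⟨k, hk1, by omega, rfl⟩

-- the explicit list B sums over: [1..s] then the quotients above s, in range order
def bList (n s : Int) : List Int :=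
  PySem.List.pyRange 1 (s + 1) 1 ++
    ((PySem.List.pyRange 1 (s + 1) 1).map (fun k => PySem.Int.floordiv n k)).filter
      (fun q => decide (s < q))

theorem sum_filter_map_eq (l : List Int) (f : Int → Int) (s : Int) :
    (((l.map f).filter (fun q => decide (s < q))).sum) =
      (l.map (fun k => if s < f k then f k else 0)).sum := by
  induction l with
  | nil => rfl
  | cons x xs ih =>
    simp only [List.map_cons, List.filter_cons]
    by_cases h : s < f x
    · simp [h, ih]
    · simp [h, ih]

theorem data_on_day_alt_eq_sum_bList {n : Int} (hn : ¬ n ≤ 0) :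
    data_on_day_alt n = (bList n (Nat.sqrt n.toNat : Int)).sum := by
  unfold data_on_day_alt bList
  simp only [hn, if_false]
  rw [PySem.List.foldl_add (g := fun k =>
    k + (if (Nat.sqrt n.toNat : Int) < PySem.Int.floordiv n k then PySem.Int.floordiv n k else 0))]
  rw [List.sum_append, sum_filter_map_eq]
  rw [PySem.List.sum_map_add_int]
  simp [List.map_id']

theorem bList_nodup {m : Nat} (hm : 1 ≤ m) :
    (bList (m : Int) (Nat.sqrt m : Int)).Nodup := by
  have hsm : Nat.sqrt m ≤ m := Nat.sqrt_le_self m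
  unfold bList
  refine List.Nodup.append (PySem.List.nodup_pyRange_one _ _) ?_ ?_
  · refine List.Nodup.filter _ ?_
    refine List.Nodup.map_on ?_ (PySem.List.nodup_pyRange_one _ _)
    intro a ha b hb hfab
    rw [PySem.List.mem_pyRange_one] at ha hb
    have ha1 : 1 ≤ a := ha.1
    have hb1 : 1 ≤ b := hb.1
    rw [fd_nat (by omega) ha1, fd_nat (by omega) hb1] at hfab
    simp only [Int.toNat_natCast] at hfab
    have h : m / a.toNat = m / b.toNat := by exact_mod_cast hfab
    have ha' : m / (m / a.toNat) = a.toNat := nat_div_div_sqrt (by omega) (by omega)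
    have hb' : m / (m / b.toNat) = b.toNat := nat_div_div_sqrt (by omega) (by omega)
    rw [h] at ha'
    omega
  · intro x hx hy
    rw [PySem.List.mem_pyRange_one] at hx
    rw [List.mem_filter] at hy
    have : (Nat.sqrt m : Int) < x := by simpa using hy.2
    omega

theorem bList_mem {m : Nat} (v : Int) :
    v ∈ bList (m : Int) (Nat.sqrt m : Int) ↔
    ((1 ≤ v ∧ v ≤ (Nat.sqrt m : Int)) ∨
     ∃ k : Int, (1 ≤ k ∧ k ≤ (Nat.sqrt m : Int)) ∧
       v = PySem.Int.floordiv (m : Int) k ∧ (Nat.sqrt m : Int) < v) := by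
  unfold bList
  rw [List.mem_append, PySem.List.mem_pyRange_one, List.mem_filter]
  constructor
  · rintro (⟨h1, h2⟩ | ⟨hmem, hgt⟩)
    · exact Or.inl ⟨h1, by omega⟩
    · obtain ⟨k, hk, rfl⟩ := List.mem_map.mp hmem
      rw [PySem.List.mem_pyRange_one] at hk
      exact Or.inr ⟨k, ⟨hk.1, by omega⟩, rfl, by simpa using hgt⟩
  · rintro (⟨h1, h2⟩ | ⟨k, ⟨hk1, hk2⟩, rfl, hgt⟩)
    · exact Or.inl ⟨h1, by omega⟩
    · refine Or.inr ⟨List.mem_map.mpr ⟨k, PySem.List.mem_pyRange_one.mpr ⟨hk1, by omega⟩, rfl⟩, ?_⟩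
      simpa using hgt

-- ===== VERDICT =====
theorem data_on_day_spec : Claim_equal_data_on_day := by
  intro n _
  unfold Spec_data_on_day
  by_cases hn : n ≤ 0
  · unfold data_on_day data_on_day_alt
    rw [dodLoop]
    simp [hn, show ¬ (1:Int) ≤ n by omega]
  · rw [data_on_day_alt_eq_sum_bList hn]
    unfold data_on_day
    obtain ⟨m, hm1, rfl⟩ : ∃ m : Nat, 1 ≤ m ∧ n = (m : Int) :=
      ⟨n.toNat, by omega, by omega⟩
    apply List.Perm.sum_eq
    rw [Int.toNat_natCast]
    refine (List.perm_ext_iff_of_nodup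
      (dodLoop_nodup _ _ _ _ List.nodup_nil (by simp)) (bList_nodup hm1)).mpr ?_
    intro v
    rw [dodLoop_mem, bList_mem v]
    simp only [List.not_mem_nil, false_or]
    exact bridge hm1 v
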